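-- pv_equiv track=rewrite | github.com/tanush-em/cognital-NIH | be/services/escalation_service.py | _detect_repeated_queries
-- ===== SOURCE A (Python) =====
-- from collections import defaultdict
--
-- def _detect_repeated_queries(user_message: str, session_id: int) -> bool:
--     """Detect if user is repeating similar queries (placeholder)"""
--     # This would need message history to detect patterns
--     # For now, check for obvious repetition in current message
--     words = user_message.lower().split()
--     if len(words) > 5:  # Only check longer messages
--         word_freq = defaultdict(int)
--         for word in words:
--             if len(word) > 3:  # Only count meaningful words
--                 word_freq[word] += 1
--
--         # Check for repeated words
--         repeated_words = [word for word, count in word_freq.items() if count > 2]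
--         return len(repeated_words) > 0
--
--     return False
-- ===== SOURCE B (Python) =====
-- def _detect_repeated_queries(user_message: str, session_id: int) -> bool:
--     words = user_message.lower().split()
--     if len(words) > 5:  # Only check longer messages
--         seen_once = set()
--         seen_twice = set()
--         for word in words:
--             if len(word) > 3:  # Only count meaningful words
--                 if word in seen_twice:
--                     return True  # third occurrence found
--                 elif word in seen_once:
--                     seen_twice.add(word)
--                 else:
--                     seen_once.add(word)
--     return False
-- ===== Notes on version B (the rewrite author's own statement) =====
-- stated objective: alternative
-- what changed: Replaces the count-dict-then-filter pass with a single pass maintaining two capped membership sets (seen once / seen twice) that returns True as soon as any meaningful word reaches its third occurrence.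
import Mathlib
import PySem

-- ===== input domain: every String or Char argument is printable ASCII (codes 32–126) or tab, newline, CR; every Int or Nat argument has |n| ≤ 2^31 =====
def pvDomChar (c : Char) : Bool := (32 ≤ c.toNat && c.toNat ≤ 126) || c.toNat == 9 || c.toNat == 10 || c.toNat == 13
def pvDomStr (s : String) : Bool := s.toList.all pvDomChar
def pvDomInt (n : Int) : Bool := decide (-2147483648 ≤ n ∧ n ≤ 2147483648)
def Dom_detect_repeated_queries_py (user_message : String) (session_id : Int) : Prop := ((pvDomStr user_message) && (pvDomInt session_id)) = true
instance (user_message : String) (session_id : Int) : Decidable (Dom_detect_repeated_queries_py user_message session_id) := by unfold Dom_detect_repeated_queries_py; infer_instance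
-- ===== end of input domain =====

-- B replaces A's count-dict-then-filter pass by one pass with two capped membership
-- sets (seen once / seen twice) and an early return on the third occurrence (objective: alternative).

-- ===== PORT A =====
def detect_repeated_queries_py (user_message : String) (session_id : Int) : Bool :=
  let words := PySem.Str.split₀ (PySem.Str.lower user_message)
  if words.length > 5 then
    let word_freq := words.foldl
      (fun d w => if PySem.Str.len w > 3 then d.modify w 0 (· + 1) else d)
      (PySem.Dict.empty : PySem.Dict String Int)
    let repeated_words := (word_freq.items.filter (fun p => decide (p.2 > 2))).map (·.1)
    decide (repeated_words.length > 0)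
  else false

-- ===== PORT B =====
def pvLoopB : List String → PySem.Set String → PySem.Set String → Bool
  | [], _, _ => false
  | w :: rest, seen_once, seen_twice =>
    if PySem.Str.len w > 3 then
      if PySem.Set.contains seen_twice w then true
      else if PySem.Set.contains seen_once w then pvLoopB rest seen_once (PySem.Set.add seen_twice w)
      else pvLoopB rest (PySem.Set.add seen_once w) seen_twice
    else pvLoopB rest seen_once seen_twice

def detect_repeated_queries_py_alt (user_message : String) (session_id : Int) : Bool :=
  let words := PySem.Str.split₀ (PySem.Str.lower user_message)
  if words.length > 5 then pvLoopB words PySem.Set.empty PySem.Set.empty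
  else false

-- ===== PRECONDITION & SPEC =====
def Spec_detect_repeated_queries_py (user_message : String) (session_id : Int) (out : Bool) : Prop := out = detect_repeated_queries_py_alt user_message session_id
instance (user_message : String) (session_id : Int) (out : Bool) : Decidable (Spec_detect_repeated_queries_py user_message session_id out) := by unfold Spec_detect_repeated_queries_py; infer_instance

-- ===== CLAIM (what is proved, stated in full; the proofs are below) =====
def Claim_equal_detect_repeated_queries_py : Prop := ∀ (user_message : String) (session_id : Int), Dom_detect_repeated_queries_py user_message session_id → Spec_detect_repeated_queries_py user_message session_id (detect_repeated_queries_py user_message session_id)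

-- ===== LEMMAS AND PROOFS =====

-- starting credit a word already has from the two sets
def pvC0 (s1 s2 : PySem.Set String) (w : String) : Nat :=
  if w ∈ s2 then 2 else if w ∈ s1 then 1 else 0

theorem pvLoopB_iff (rest : List String) (s1 s2 : PySem.Set String)
    (hsub : ∀ w ∈ s2, w ∈ s1) :
    (pvLoopB rest s1 s2 = true ↔
      ∃ w, PySem.Str.len w > 3 ∧ 3 ≤ pvC0 s1 s2 w + rest.count w) := by
  induction rest generalizing s1 s2 with
  | nil =>
    simp only [pvLoopB]
    constructor
    · intro h; cases h
    · rintro ⟨w, _, h3⟩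
      unfold pvC0 at h3
      split_ifs at h3 <;> simp_all <;> omega
  | cons w rest ih =>
    simp only [pvLoopB]
    by_cases hlen : PySem.Str.len w > 3
    · simp only [hlen, if_true]
      by_cases h2 : w ∈ s2
      · simp only [(PySem.Set.contains_iff s2 w).2 h2, if_true]
        constructor
        · intro _
          refine ⟨w, hlen, ?_⟩
          unfold pvC0
          simp only [h2, if_true, List.count_cons_self]
          omega
        · intro _; trivial
      · have hc2 : PySem.Set.contains s2 w = false := by
          by_contra h; simp only [Bool.not_eq_false] at h
          exact h2 ((PySem.Set.contains_iff s2 w).1 h)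
        simp only [hc2, Bool.false_eq_true, if_false]
        by_cases h1 : w ∈ s1
        · simp only [(PySem.Set.contains_iff s1 w).2 h1, if_true]
          rw [ih s1 (PySem.Set.add s2 w) (by
            intro v hv
            rcases (PySem.Set.mem_add _ _ _).1 hv with hv' | hv'
            · exact hsub v hv'
            · subst hv'; exact h1)]
          constructor
          · rintro ⟨v, hv3, hvc⟩
            refine ⟨v, hv3, ?_⟩
            by_cases hvw : v = w
            · subst hvw
              unfold pvC0 at hvc ⊢
              simp [h1, h2, PySem.Set.mem_add, List.count_cons] at hvc ⊢
              omega
            · unfold pvC0 at hvc ⊢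
              simp [PySem.Set.mem_add, hvw, List.count_cons] at hvc ⊢
              split_ifs at hvc ⊢ <;> simp_all <;> omega
          · rintro ⟨v, hv3, hvc⟩
            refine ⟨v, hv3, ?_⟩
            by_cases hvw : v = w
            · subst hvw
              unfold pvC0 at hvc ⊢
              simp [h1, h2, PySem.Set.mem_add, List.count_cons] at hvc ⊢
              omega
            · unfold pvC0 at hvc ⊢
              simp [PySem.Set.mem_add, hvw, List.count_cons] at hvc ⊢
              split_ifs at hvc ⊢ <;> simp_all <;> omega
        · have hc1 : PySem.Set.contains s1 w = false := by
            by_contra h; simp only [Bool.not_eq_false] at h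
            exact h1 ((PySem.Set.contains_iff s1 w).1 h)
          simp only [hc1, Bool.false_eq_true, if_false]
          rw [ih (PySem.Set.add s1 w) s2 (by
            intro v hv
            exact (PySem.Set.mem_add _ _ _).2 (Or.inl (hsub v hv)))]
          constructor
          · rintro ⟨v, hv3, hvc⟩
            refine ⟨v, hv3, ?_⟩
            by_cases hvw : v = w
            · subst hvw
              unfold pvC0 at hvc ⊢
              simp [h1, h2, PySem.Set.mem_add, List.count_cons] at hvc ⊢
              omega
            · unfold pvC0 at hvc ⊢
              simp [PySem.Set.mem_add, hvw, List.count_cons] at hvc ⊢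
              split_ifs at hvc ⊢ <;> simp_all <;> omega
          · rintro ⟨v, hv3, hvc⟩
            refine ⟨v, hv3, ?_⟩
            by_cases hvw : v = w
            · subst hvw
              unfold pvC0 at hvc ⊢
              simp [h1, h2, PySem.Set.mem_add, List.count_cons] at hvc ⊢
              omega
            · unfold pvC0 at hvc ⊢
              simp [PySem.Set.mem_add, hvw, List.count_cons] at hvc ⊢
              split_ifs at hvc ⊢ <;> simp_all <;> omega
    · simp only [hlen, if_false]
      rw [ih s1 s2 hsub]
      constructor
      · rintro ⟨v, hv3, hvc⟩
        refine ⟨v, hv3, ?_⟩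
        have hvw : v ≠ w := fun h => hlen (h ▸ hv3)
        simp only [List.count_cons, beq_iff_eq]
        split_ifs <;> omega
      · rintro ⟨v, hv3, hvc⟩
        refine ⟨v, hv3, ?_⟩
        have hvw : v ≠ w := fun h => hlen (h ▸ hv3)
        simp only [List.count_cons, beq_iff_eq] at hvc
        split_ifs at hvc with h
        · exact absurd h.symm hvw
        · omega

-- A's dict/filter result characterised: some meaningful word occurs more than twice
theorem pvA_iff (words : List String) :
    (decide ((((words.foldl
        (fun d w => if PySem.Str.len w > 3 then d.modify w 0 (· + 1) else d)
        (PySem.Dict.empty : PySem.Dict String Int)).items.filter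
          (fun p => decide (p.2 > 2))).map (·.1)).length > 0) = true ↔
      ∃ w, PySem.Str.len w > 3 ∧ 3 ≤ words.count w) := by
  have hfold : words.foldl
      (fun d w => if PySem.Str.len w > 3 then d.modify w 0 (· + 1) else d)
      (PySem.Dict.empty : PySem.Dict String Int)
      = PySem.Dict.counter (words.filter (fun w => decide (PySem.Str.len w > 3))) := by
    rw [PySem.Dict.counter_eq_foldl, List.foldl_filter]
    simp only [decide_eq_true_eq]
  rw [hfold]
  set ms := words.filter (fun w => decide (PySem.Str.len w > 3)) with hms
  rw [PySem.Dict.items_counter]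
  simp only [decide_eq_true_eq, List.length_pos_iff, ne_eq, List.map_eq_nil_iff,
    List.filter_eq_nil_iff, not_forall]
  constructor
  · rintro ⟨p, hp, hc⟩
    simp only [List.mem_map] at hp
    rcases hp with ⟨k, hk, rfl⟩
    have hkm : k ∈ ms := (PySem.Set.mem_ofList _ _).1 hk
    have hk3 : PySem.Str.len k > 3 := by
      rw [hms] at hkm; simp only [List.mem_filter, decide_eq_true_eq] at hkm; exact hkm.2
    refine ⟨k, hk3, ?_⟩
    simp only [not_not, decide_eq_true_eq] at hc
    have hcc : ms.count k = words.count k := by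
      rw [hms]; exact List.count_filter (by simpa using hk3)
    rw [← hcc]
    exact_mod_cast by omega
  · rintro ⟨w, hw3, hwc⟩
    have hwm : w ∈ ms := by
      rw [hms]; rw [List.mem_filter]
      refine ⟨?_, by simpa using hw3⟩
      exact List.count_pos_iff.1 (by omega)
    refine ⟨(w, (ms.count w : Int)), ?_, ?_⟩
    · exact List.mem_map.2 ⟨w, (PySem.Set.mem_ofList _ _).2 hwm, rfl⟩
    · simp only [not_not, decide_eq_true_eq]
      have hcc : ms.count w = words.count w := by
        rw [hms]; exact List.count_filter (by simpa using hw3)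
      rw [hcc]; exact_mod_cast by omega

-- ===== VERDICT (by name: the statement is the Claim_ definition above) =====
theorem detect_repeated_queries_py_spec : Claim_equal_detect_repeated_queries_py := by
  intro user_message session_id _
  unfold Spec_detect_repeated_queries_py detect_repeated_queries_py detect_repeated_queries_py_alt
  set words := PySem.Str.split₀ (PySem.Str.lower user_message) with hw
  by_cases hlen : words.length > 5
  · simp only [hlen, if_true]
    have hB := pvLoopB_iff words PySem.Set.empty PySem.Set.empty (by intro w h; cases h)
    have hA := pvA_iff words
    have hc0 : ∀ w, pvC0 PySem.Set.empty PySem.Set.empty w = 0 := by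
      intro w; unfold pvC0 PySem.Set.empty; simp
    simp only [hc0, Nat.zero_add] at hB
    rw [← hA] at hB
    exact Bool.eq_iff_iff.2 hB.symm
  · simp only [hlen, if_false]
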